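-- pv_equiv track=rewrite | github.com/paty-oliveira/python-coding-challenge | src/challenge03.py | online_count
-- ===== SOURCE A (Python) =====
-- def online_count(statuses: dict):
--     online_users = 0
--     for status in statuses.values():
--         if status == "online":
--             online_users += 1
--         else:
--             online_users = 0
--
--     return online_users
-- ===== SOURCE B (Python) =====
-- def online_count(statuses: dict):
--     count = 0
--     for status in reversed(list(statuses.values())):
--         if status != "online":
--             break
--         count += 1
--     return count
-- ===== Notes on version B (the rewrite author's own statement) =====
-- stated objective: idiomatic
-- what changed: Scans the values backwards and breaks at the first non-'online' status, instead of a forward pass that resets the counter.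
import Mathlib
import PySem

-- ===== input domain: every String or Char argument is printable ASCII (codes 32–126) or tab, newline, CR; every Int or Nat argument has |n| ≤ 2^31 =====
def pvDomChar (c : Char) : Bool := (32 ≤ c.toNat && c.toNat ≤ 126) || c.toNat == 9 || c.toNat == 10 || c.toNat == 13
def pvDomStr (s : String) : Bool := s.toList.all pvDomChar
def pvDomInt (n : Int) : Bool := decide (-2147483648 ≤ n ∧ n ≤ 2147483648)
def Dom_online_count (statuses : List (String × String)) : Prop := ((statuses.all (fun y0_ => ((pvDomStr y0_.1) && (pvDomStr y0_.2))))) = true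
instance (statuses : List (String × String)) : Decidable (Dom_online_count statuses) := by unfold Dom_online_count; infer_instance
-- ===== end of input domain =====

-- B scans the values backwards and breaks at the first non-'online' status (idiomatic trailing-streak count); same return value as A.


-- ===== PORT A =====
-- forward fold over the values: +1 on "online", reset to 0 otherwise
def online_count (statuses : List (String × String)) : Int :=
  statuses.foldl (fun acc p => if p.2 == "online" then acc + 1 else 0) 0

-- ===== PORT B =====
-- count leading "online" values of the reversed list, stopping at the first other status
def pvTailCount : List (String × String) → Int
  | [] => 0
  | p :: rest => if p.2 == "online" then 1 + pvTailCount rest else 0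

def online_count_alt (statuses : List (String × String)) : Int :=
  pvTailCount statuses.reverse

-- ===== PRECONDITION & SPEC =====
def Spec_online_count (statuses : List (String × String)) (out : Int) : Prop := out = online_count_alt statuses
instance (statuses : List (String × String)) (out : Int) : Decidable (Spec_online_count statuses out) := by unfold Spec_online_count; infer_instance

-- ===== CLAIM (what is proved, stated in full; the proofs are below) =====
def Claim_equal_online_count : Prop := ∀ (statuses : List (String × String)), Dom_online_count statuses → Spec_online_count statuses (online_count statuses)

-- ===== LEMMAS AND PROOFS =====
theorem online_count_eq_alt (statuses : List (String × String)) :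
    online_count statuses = online_count_alt statuses := by
  induction statuses using List.reverseRecOn with
  | nil => rfl
  | append_singleton xs x ih =>
    have h1 : online_count (xs ++ [x])
        = (if x.2 == "online" then online_count xs + 1 else 0) := by
      simp [online_count, List.foldl_append]
    have h2 : online_count_alt (xs ++ [x])
        = (if x.2 == "online" then 1 + online_count_alt xs else 0) := by
      simp [online_count_alt, pvTailCount]
    rw [h1, h2, ih]
    by_cases h : x.2 = "online" <;> simp [h, Int.add_comm]

-- ===== VERDICT (by name: the statement is the Claim_ definition above) =====
theorem online_count_spec : Claim_equal_online_count := by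
  intro s _
  exact online_count_eq_alt s
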